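-- pv_equiv track=rewrite | github.com/mtshomskyieee/mvp_math_solver | core/virtual_tool_manager.py | _identify_primary_operation
-- ===== SOURCE A (Python) =====
-- def _identify_primary_operation(problem: str) -> str:
--     """Identify the primary operation type of a problem."""
--     problem_lower = problem.lower()
--
--     # Check for modulo operation first (since it might contain division-like terms)
--     if 'mod' in problem_lower or '%' in problem_lower or 'modulo' in problem_lower or 'remainder' in problem_lower:
--         return "modulo"
--
--     # Check for other operations
--     if any(term in problem_lower for term in ['add', 'sum', 'plus', '+']):
--         return "addition"
--     if any(term in problem_lower for term in ['subtract', 'minus', 'difference', '-']):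
--         return "subtraction"
--     if any(term in problem_lower for term in ['multiply', 'product', 'times', '*']):
--         return "multiplication"
--     if any(term in problem_lower for term in ['divide', 'quotient', '/']):
--         return "division"
--     if any(term in problem_lower for term in ['power', 'exponent', '^', 'squared', 'cubed']):
--         return "exponentiation"
--     if 'sqrt' in problem_lower or 'square root' in problem_lower:
--         return "square_root"
--     if 'round' in problem_lower:
--         return "rounding"
--
--     # Default to "unknown" if no clear operation is identified
--     return "unknown"
-- ===== SOURCE B (Python) =====
-- # Single left-to-right scan of the string: at each position, record the lowest
-- # priority of any keyword starting there; the label of the overall minimum wins.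
-- _TERMS = [
--     ("mod", 0), ("%", 0), ("modulo", 0), ("remainder", 0),
--     ("add", 1), ("sum", 1), ("plus", 1), ("+", 1),
--     ("subtract", 2), ("minus", 2), ("difference", 2), ("-", 2),
--     ("multiply", 3), ("product", 3), ("times", 3), ("*", 3),
--     ("divide", 4), ("quotient", 4), ("/", 4),
--     ("power", 5), ("exponent", 5), ("^", 5), ("squared", 5), ("cubed", 5),
--     ("sqrt", 6), ("square root", 6),
--     ("round", 7),
-- ]
-- _LABELS = ["modulo", "addition", "subtraction", "multiplication",
--            "division", "exponentiation", "square_root", "rounding"]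
--
-- def _identify_primary_operation(problem: str) -> str:
--     pl = problem.lower()
--     best = len(_LABELS)  # sentinel: nothing found yet
--     for i in range(len(pl)):
--         for term, prio in _TERMS:
--             if prio < best and pl.startswith(term, i):
--                 best = prio
--     return _LABELS[best] if best < len(_LABELS) else "unknown"
-- ===== Notes on version B (the rewrite author's own statement) =====
-- stated objective: alternative
-- what changed: Instead of testing each keyword group for substring containment in priority order, B makes one left-to-right scan over the string's positions, keeping the minimum priority of any keyword that starts at each position, and maps the overall minimum to its label (unknown if none matched).
import Mathlib
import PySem

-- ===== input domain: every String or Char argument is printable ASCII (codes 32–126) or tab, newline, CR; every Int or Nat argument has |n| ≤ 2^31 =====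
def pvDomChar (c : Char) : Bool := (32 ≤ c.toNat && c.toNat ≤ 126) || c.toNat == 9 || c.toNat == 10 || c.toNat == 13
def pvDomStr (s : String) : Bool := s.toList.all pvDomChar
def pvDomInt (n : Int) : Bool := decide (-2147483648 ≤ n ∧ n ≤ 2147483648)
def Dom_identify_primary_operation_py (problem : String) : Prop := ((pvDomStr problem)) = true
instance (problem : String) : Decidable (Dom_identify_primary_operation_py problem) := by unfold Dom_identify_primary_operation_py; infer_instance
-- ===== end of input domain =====

-- B replaces the ordered substring-check cascade by ONE left-to-right scan of the string that
-- keeps the minimum priority of any keyword starting at each position (alternative decomposition).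


-- ===== PORT A =====
def identify_primary_operation_py (problem : String) : String :=
  let problem_lower := PySem.Str.lower problem
  if PySem.Str.isIn "mod" problem_lower || PySem.Str.isIn "%" problem_lower ||
     PySem.Str.isIn "modulo" problem_lower || PySem.Str.isIn "remainder" problem_lower then "modulo"
  else if (["add", "sum", "plus", "+"]).any (fun term => PySem.Str.isIn term problem_lower) then "addition"
  else if (["subtract", "minus", "difference", "-"]).any (fun term => PySem.Str.isIn term problem_lower) then "subtraction"
  else if (["multiply", "product", "times", "*"]).any (fun term => PySem.Str.isIn term problem_lower) then "multiplication"
  else if (["divide", "quotient", "/"]).any (fun term => PySem.Str.isIn term problem_lower) then "division"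
  else if (["power", "exponent", "^", "squared", "cubed"]).any (fun term => PySem.Str.isIn term problem_lower) then "exponentiation"
  else if PySem.Str.isIn "sqrt" problem_lower || PySem.Str.isIn "square root" problem_lower then "square_root"
  else if PySem.Str.isIn "round" problem_lower then "rounding"
  else "unknown"

-- ===== PORT B =====
-- flat (term, priority) list, as in Source B
def pvTerms : List (List Char × Nat) :=
  [("mod".toList, 0), ("%".toList, 0), ("modulo".toList, 0), ("remainder".toList, 0),
   ("add".toList, 1), ("sum".toList, 1), ("plus".toList, 1), ("+".toList, 1),
   ("subtract".toList, 2), ("minus".toList, 2), ("difference".toList, 2), ("-".toList, 2),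
   ("multiply".toList, 3), ("product".toList, 3), ("times".toList, 3), ("*".toList, 3),
   ("divide".toList, 4), ("quotient".toList, 4), ("/".toList, 4),
   ("power".toList, 5), ("exponent".toList, 5), ("^".toList, 5), ("squared".toList, 5), ("cubed".toList, 5),
   ("sqrt".toList, 6), ("square root".toList, 6),
   ("round".toList, 7)]

def pvLabels : List String :=
  ["modulo", "addition", "subtraction", "multiplication",
   "division", "exponentiation", "square_root", "rounding"]

-- the inner loop of Source B: update `best` with every term that starts at this position
def pvStep (s : List Char) (best : Nat) : Nat :=
  pvTerms.foldl (fun b tp => if tp.2 < b && tp.1.isPrefixOf s then tp.2 else b) best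

-- the outer loop: walk the positions (suffixes) of the string left to right
def pvScan : List Char → Nat → Nat
  | [], best => best
  | c :: rest, best => pvScan rest (pvStep (c :: rest) best)

def identify_primary_operation_py_alt (problem : String) : String :=
  let pl := (PySem.Str.lower problem).toList
  let best := pvScan pl pvLabels.length
  if best < pvLabels.length then pvLabels.getD best "unknown" else "unknown"

-- ===== PRECONDITION & SPEC =====
def Spec_identify_primary_operation_py (problem : String) (out : String) : Prop := out = identify_primary_operation_py_alt problem
instance (problem : String) (out : String) : Decidable (Spec_identify_primary_operation_py problem out) := by unfold Spec_identify_primary_operation_py; infer_instance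

-- ===== CLAIM (what is proved, stated in full; the proofs are below) =====
def Claim_equal_identify_primary_operation_py : Prop := ∀ (problem : String), Dom_identify_primary_operation_py problem → Spec_identify_primary_operation_py problem (identify_primary_operation_py problem)

-- ===== LEMMAS AND PROOFS =====

-- fold with the `isIn`-min step over any term list
def pvFoldIn (l : List (List Char × Nat)) (s : List Char) (b : Nat) : Nat :=
  l.foldl (fun b tp => if PySem.Chars.isIn tp.1 s then min b tp.2 else b) b

def pvFoldPre (l : List (List Char × Nat)) (s : List Char) (b : Nat) : Nat :=
  l.foldl (fun b tp => if tp.1.isPrefixOf s then min b tp.2 else b) b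

lemma pvFoldIn_cons (tp : List Char × Nat) (l : List (List Char × Nat)) (s : List Char) (b : Nat) :
    pvFoldIn (tp :: l) s b = pvFoldIn l s (if PySem.Chars.isIn tp.1 s then min b tp.2 else b) := rfl

lemma pvFoldPre_cons (tp : List Char × Nat) (l : List (List Char × Nat)) (s : List Char) (b : Nat) :
    pvFoldPre (tp :: l) s b = pvFoldPre l s (if tp.1.isPrefixOf s then min b tp.2 else b) := rfl

lemma pvStep_eq (s : List Char) (b : Nat) : pvStep s b = pvFoldPre pvTerms s b := by
  unfold pvStep pvFoldPre
  apply PySem.List.foldl_congr_mem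
  intro acc tp _
  by_cases hpre : tp.1.isPrefixOf s = true
  · simp only [hpre, Bool.and_true, if_true]
    split_ifs with h
    · simp only [decide_eq_true_eq] at h
      exact (Nat.min_eq_right (by omega)).symm
    · simp only [decide_eq_true_eq] at h
      exact (Nat.min_eq_left (by omega)).symm
  · simp [hpre]

lemma pvFoldIn_min (l : List (List Char × Nat)) (s : List Char) (k b : Nat) :
    pvFoldIn l s (min k b) = min k (pvFoldIn l s b) := by
  induction l generalizing b with
  | nil => rfl
  | cons tp l ih =>
      simp only [pvFoldIn_cons]
      by_cases h : PySem.Chars.isIn tp.1 s = true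
      · simp only [h, if_true]
        rw [show min (min k b) tp.2 = min k (min b tp.2) from by omega, ih]
      · simp [h, ih]

lemma pvFoldPre_min (l : List (List Char × Nat)) (s : List Char) (k b : Nat) :
    pvFoldPre l s (min k b) = min k (pvFoldPre l s b) := by
  induction l generalizing b with
  | nil => rfl
  | cons tp l ih =>
      simp only [pvFoldPre_cons]
      by_cases h : tp.1.isPrefixOf s = true
      · simp only [h, if_true]
        rw [show min (min k b) tp.2 = min k (min b tp.2) from by omega, ih]
      · simp [h, ih]

-- `sub in (c :: rest)` splits into "starts here" or "occurs later"
lemma isIn_cons (t : List Char) (c : Char) (rest : List Char) :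
    PySem.Chars.isIn t (c :: rest) = (t.isPrefixOf (c :: rest) || PySem.Chars.isIn t rest) := by
  cases hx : PySem.Chars.isIn t (c :: rest) with
  | false =>
      have hninf := (PySem.Chars.isIn_eq_false_iff t (c :: rest)).mp hx
      have hp : t.isPrefixOf (c :: rest) = false := by
        rw [Bool.eq_false_iff]
        intro hc
        exact hninf (List.infix_cons_iff.mpr (Or.inl (List.isPrefixOf_iff_prefix.mp hc)))
      have hi : PySem.Chars.isIn t rest = false := by
        rw [Bool.eq_false_iff]
        intro hc
        exact hninf (List.infix_cons_iff.mpr (Or.inr ((PySem.Chars.isIn_iff_infix t rest).mp hc)))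
      simp [hp, hi]
  | true =>
      rcases List.infix_cons_iff.mp ((PySem.Chars.isIn_iff_infix t (c :: rest)).mp hx) with hpf | hif
      · simp [List.isPrefixOf_iff_prefix.mpr hpf]
      · simp [(PySem.Chars.isIn_iff_infix t rest).mpr hif]

-- processing one position then the rest = processing the whole suffix
lemma pvFoldIn_cons_char (l : List (List Char × Nat)) (c : Char) (rest : List Char) (b : Nat) :
    pvFoldIn l rest (pvFoldPre l (c :: rest) b) = pvFoldIn l (c :: rest) b := by
  induction l generalizing b with
  | nil => rfl
  | cons tp l ih =>
      simp only [pvFoldIn_cons, pvFoldPre_cons, isIn_cons tp.1 c rest]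
      by_cases hp : tp.1.isPrefixOf (c :: rest) = true <;>
        by_cases hi : PySem.Chars.isIn tp.1 rest = true
      · -- starts here and occurs later
        simp only [hp, hi, Bool.true_or, if_true]
        rw [show min b tp.2 = min tp.2 b from by omega, pvFoldPre_min,
            show min (min tp.2 (pvFoldPre l (c :: rest) b)) tp.2
               = min tp.2 (pvFoldPre l (c :: rest) b) from by omega,
            pvFoldIn_min, ih, ← pvFoldIn_min]
      · -- starts here only
        simp only [hp, hi, Bool.true_or, if_true, Bool.false_eq_true, if_false]
        rw [show min b tp.2 = min tp.2 b from by omega, pvFoldPre_min,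
            pvFoldIn_min, ih, ← pvFoldIn_min]
      · -- occurs later only
        simp only [hp, hi, Bool.false_eq_true, if_false, Bool.false_or, if_true]
        rw [show min (pvFoldPre l (c :: rest) b) tp.2
              = min tp.2 (pvFoldPre l (c :: rest) b) from by omega,
            pvFoldIn_min, ih, ← pvFoldIn_min,
            show min b tp.2 = min tp.2 b from by omega]
      · -- neither
        simp only [hp, hi, Bool.false_eq_true, if_false, Bool.false_or, ih]

lemma pvFoldIn_nil (b : Nat) : pvFoldIn pvTerms [] b = b := by
  have h : ∀ t ∈ pvTerms, PySem.Chars.isIn t.1 [] = false := by decide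
  unfold pvFoldIn
  rw [PySem.List.foldl_congr_mem pvTerms _ (fun b _ => b) b
      (fun acc tp htp => by simp [h tp htp])]
  exact List.foldl_fixed pvTerms

lemma pvScan_eq (s : List Char) (b : Nat) : pvScan s b = pvFoldIn pvTerms s b := by
  induction s generalizing b with
  | nil => simp [pvScan, pvFoldIn_nil]
  | cons c rest ih => rw [pvScan, ih, pvStep_eq, pvFoldIn_cons_char]

-- value of the fold is at most its start
lemma pvFoldIn_le_init (l : List (List Char × Nat)) (s : List Char) (b : Nat) :
    pvFoldIn l s b ≤ b := by
  induction l generalizing b with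
  | nil => exact le_refl b
  | cons tp l ih =>
      rw [pvFoldIn_cons]
      by_cases h : PySem.Chars.isIn tp.1 s = true
      · simp only [h, if_true]
        exact le_trans (ih (min b tp.2)) (by omega)
      · simp only [h, Bool.false_eq_true, if_false]; exact ih b

-- any matched term bounds the fold from above
lemma pvFoldIn_le (l : List (List Char × Nat)) (s : List Char) (b : Nat) (t : List Char) (p : Nat)
    (hmem : (t, p) ∈ l) (hin : PySem.Chars.isIn t s = true) : pvFoldIn l s p ≤ p ∧ pvFoldIn l s b ≤ p := by
  induction l generalizing b with
  | nil => cases hmem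
  | cons tp l ih =>
      rcases List.mem_cons.mp hmem with heq | hmem'
      · subst heq
        simp only [pvFoldIn_cons, hin, if_true]
        exact ⟨le_trans (pvFoldIn_le_init l s (min p p)) (Nat.min_le_right p p),
               le_trans (pvFoldIn_le_init l s (min b p)) (Nat.min_le_right b p)⟩
      · simp only [pvFoldIn_cons]
        by_cases h : PySem.Chars.isIn tp.1 s = true
        · simp only [h, if_true]
          exact ⟨(ih (min p tp.2) hmem').2, (ih (min b tp.2) hmem').2⟩
        · simp only [h, Bool.false_eq_true, if_false]
          exact ⟨(ih p hmem').1, (ih b hmem').2⟩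

-- if nothing of priority below q is matched, the fold stays at least q
lemma pvFoldIn_ge (l : List (List Char × Nat)) (s : List Char) (b : Nat) (q : Nat) (hb : q ≤ b)
    (h : ∀ tp ∈ l, tp.2 < q → PySem.Chars.isIn tp.1 s = false) : q ≤ pvFoldIn l s b := by
  induction l generalizing b with
  | nil => exact hb
  | cons tp l ih =>
      rw [pvFoldIn_cons]
      by_cases hin : PySem.Chars.isIn tp.1 s = true
      · have hq : ¬ tp.2 < q := by
          intro hlt
          have := h tp (List.mem_cons_self) hlt
          rw [this] at hin; cases hin
        simp only [hin, if_true]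
        exact ih (min b tp.2) (by omega) (fun tp' h' hlt => h tp' (List.mem_cons_of_mem _ h') hlt)
      · simp only [hin, Bool.false_eq_true, if_false]
        exact ih b hb (fun tp' h' hlt => h tp' (List.mem_cons_of_mem _ h') hlt)

-- pin the fold's value: some term of priority i matches, nothing below i does
lemma pvValue_eq (s : List Char) (i : Nat) (t : List Char)
    (hi8 : i ≤ 8) (hmem : (t, i) ∈ pvTerms) (hin : PySem.Chars.isIn t s = true)
    (hprev : ∀ tp ∈ pvTerms, tp.2 < i → PySem.Chars.isIn tp.1 s = false) :
    pvFoldIn pvTerms s 8 = i :=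
  le_antisymm (pvFoldIn_le pvTerms s 8 t i hmem hin).2 (pvFoldIn_ge pvTerms s 8 i hi8 hprev)

-- the whole equivalence, over the lowered character list
set_option maxHeartbeats 2000000 in
lemma pvMain (s : List Char) :
    (if (PySem.Chars.isIn "mod".toList s || (PySem.Chars.isIn "%".toList s ||
        (PySem.Chars.isIn "modulo".toList s || PySem.Chars.isIn "remainder".toList s))) = true then "modulo"
     else if (PySem.Chars.isIn "add".toList s || (PySem.Chars.isIn "sum".toList s ||
        (PySem.Chars.isIn "plus".toList s || PySem.Chars.isIn "+".toList s))) = true then "addition"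
     else if (PySem.Chars.isIn "subtract".toList s || (PySem.Chars.isIn "minus".toList s ||
        (PySem.Chars.isIn "difference".toList s || PySem.Chars.isIn "-".toList s))) = true then "subtraction"
     else if (PySem.Chars.isIn "multiply".toList s || (PySem.Chars.isIn "product".toList s ||
        (PySem.Chars.isIn "times".toList s || PySem.Chars.isIn "*".toList s))) = true then "multiplication"
     else if (PySem.Chars.isIn "divide".toList s || (PySem.Chars.isIn "quotient".toList s ||
        PySem.Chars.isIn "/".toList s)) = true then "division"
     else if (PySem.Chars.isIn "power".toList s || (PySem.Chars.isIn "exponent".toList s ||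
        (PySem.Chars.isIn "^".toList s || (PySem.Chars.isIn "squared".toList s ||
        PySem.Chars.isIn "cubed".toList s)))) = true then "exponentiation"
     else if (PySem.Chars.isIn "sqrt".toList s || PySem.Chars.isIn "square root".toList s) = true then "square_root"
     else if PySem.Chars.isIn "round".toList s = true then "rounding"
     else "unknown")
    = (if pvFoldIn pvTerms s 8 < 8 then pvLabels.getD (pvFoldIn pvTerms s 8) "unknown" else "unknown") := by
  by_cases g0 : (PySem.Chars.isIn "mod".toList s || (PySem.Chars.isIn "%".toList s ||
      (PySem.Chars.isIn "modulo".toList s || PySem.Chars.isIn "remainder".toList s))) = true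
  · rw [if_pos g0]
    simp only [Bool.or_eq_true] at g0
    have hv : pvFoldIn pvTerms s 8 = 0 := by
      rcases g0 with h | h | h | h
      · exact pvValue_eq s 0 _ (by omega) (by decide) h (by intro tp htp hlt; omega)
      · exact pvValue_eq s 0 _ (by omega) (by decide) h (by intro tp htp hlt; omega)
      · exact pvValue_eq s 0 _ (by omega) (by decide) h (by intro tp htp hlt; omega)
      · exact pvValue_eq s 0 _ (by omega) (by decide) h (by intro tp htp hlt; omega)
    rw [hv]; norm_num [pvLabels]
  · rw [if_neg g0]
    simp only [Bool.or_eq_true, not_or, Bool.not_eq_true] at g0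
    obtain ⟨e0, e1, e2, e3⟩ := g0
    have hprev1 : ∀ tp ∈ pvTerms, tp.2 < 1 → PySem.Chars.isIn tp.1 s = false := by
      intro tp htp hlt
      simp only [pvTerms, List.mem_cons, List.not_mem_nil, or_false] at htp
      rcases htp with rfl|rfl|rfl|rfl|rfl|rfl|rfl|rfl|rfl|rfl|rfl|rfl|rfl|rfl|rfl|rfl|rfl|rfl|rfl|rfl|rfl|rfl|rfl|rfl|rfl|rfl|rfl <;>
                first | exact absurd hlt (by decide) | assumption
    by_cases g1 : (PySem.Chars.isIn "add".toList s || (PySem.Chars.isIn "sum".toList s ||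
        (PySem.Chars.isIn "plus".toList s || PySem.Chars.isIn "+".toList s))) = true
    · rw [if_pos g1]
      simp only [Bool.or_eq_true] at g1
      have hv : pvFoldIn pvTerms s 8 = 1 := by
        rcases g1 with h | h | h | h
        · exact pvValue_eq s 1 _ (by omega) (by decide) h hprev1
        · exact pvValue_eq s 1 _ (by omega) (by decide) h hprev1
        · exact pvValue_eq s 1 _ (by omega) (by decide) h hprev1
        · exact pvValue_eq s 1 _ (by omega) (by decide) h hprev1
      rw [hv]; norm_num [pvLabels]
    · rw [if_neg g1]
      simp only [Bool.or_eq_true, not_or, Bool.not_eq_true] at g1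
      obtain ⟨f0, f1, f2, f3⟩ := g1
      have hprev2 : ∀ tp ∈ pvTerms, tp.2 < 2 → PySem.Chars.isIn tp.1 s = false := by
        intro tp htp hlt
        simp only [pvTerms, List.mem_cons, List.not_mem_nil, or_false] at htp
        rcases htp with rfl|rfl|rfl|rfl|rfl|rfl|rfl|rfl|rfl|rfl|rfl|rfl|rfl|rfl|rfl|rfl|rfl|rfl|rfl|rfl|rfl|rfl|rfl|rfl|rfl|rfl|rfl <;>
                first | exact absurd hlt (by decide) | assumption
      by_cases g2 : (PySem.Chars.isIn "subtract".toList s || (PySem.Chars.isIn "minus".toList s ||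
          (PySem.Chars.isIn "difference".toList s || PySem.Chars.isIn "-".toList s))) = true
      · rw [if_pos g2]
        simp only [Bool.or_eq_true] at g2
        have hv : pvFoldIn pvTerms s 8 = 2 := by
          rcases g2 with h | h | h | h
          · exact pvValue_eq s 2 _ (by omega) (by decide) h hprev2
          · exact pvValue_eq s 2 _ (by omega) (by decide) h hprev2
          · exact pvValue_eq s 2 _ (by omega) (by decide) h hprev2
          · exact pvValue_eq s 2 _ (by omega) (by decide) h hprev2
        rw [hv]; norm_num [pvLabels]
      · rw [if_neg g2]
        simp only [Bool.or_eq_true, not_or, Bool.not_eq_true] at g2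
        obtain ⟨d0, d1, d2, d3⟩ := g2
        have hprev3 : ∀ tp ∈ pvTerms, tp.2 < 3 → PySem.Chars.isIn tp.1 s = false := by
          intro tp htp hlt
          simp only [pvTerms, List.mem_cons, List.not_mem_nil, or_false] at htp
          rcases htp with rfl|rfl|rfl|rfl|rfl|rfl|rfl|rfl|rfl|rfl|rfl|rfl|rfl|rfl|rfl|rfl|rfl|rfl|rfl|rfl|rfl|rfl|rfl|rfl|rfl|rfl|rfl <;>
                first | exact absurd hlt (by decide) | assumption
        by_cases g3 : (PySem.Chars.isIn "multiply".toList s || (PySem.Chars.isIn "product".toList s ||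
            (PySem.Chars.isIn "times".toList s || PySem.Chars.isIn "*".toList s))) = true
        · rw [if_pos g3]
          simp only [Bool.or_eq_true] at g3
          have hv : pvFoldIn pvTerms s 8 = 3 := by
            rcases g3 with h | h | h | h
            · exact pvValue_eq s 3 _ (by omega) (by decide) h hprev3
            · exact pvValue_eq s 3 _ (by omega) (by decide) h hprev3
            · exact pvValue_eq s 3 _ (by omega) (by decide) h hprev3
            · exact pvValue_eq s 3 _ (by omega) (by decide) h hprev3
          rw [hv]; norm_num [pvLabels]
        · rw [if_neg g3]
          simp only [Bool.or_eq_true, not_or, Bool.not_eq_true] at g3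
          obtain ⟨c0, c1, c2, c3⟩ := g3
          have hprev4 : ∀ tp ∈ pvTerms, tp.2 < 4 → PySem.Chars.isIn tp.1 s = false := by
            intro tp htp hlt
            simp only [pvTerms, List.mem_cons, List.not_mem_nil, or_false] at htp
            rcases htp with rfl|rfl|rfl|rfl|rfl|rfl|rfl|rfl|rfl|rfl|rfl|rfl|rfl|rfl|rfl|rfl|rfl|rfl|rfl|rfl|rfl|rfl|rfl|rfl|rfl|rfl|rfl <;>
                first | exact absurd hlt (by decide) | assumption
          by_cases g4 : (PySem.Chars.isIn "divide".toList s || (PySem.Chars.isIn "quotient".toList s ||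
              PySem.Chars.isIn "/".toList s)) = true
          · rw [if_pos g4]
            simp only [Bool.or_eq_true] at g4
            have hv : pvFoldIn pvTerms s 8 = 4 := by
              rcases g4 with h | h | h
              · exact pvValue_eq s 4 _ (by omega) (by decide) h hprev4
              · exact pvValue_eq s 4 _ (by omega) (by decide) h hprev4
              · exact pvValue_eq s 4 _ (by omega) (by decide) h hprev4
            rw [hv]; norm_num [pvLabels]
          · rw [if_neg g4]
            simp only [Bool.or_eq_true, not_or, Bool.not_eq_true] at g4
            obtain ⟨b0, b1, b2⟩ := g4
            have hprev5 : ∀ tp ∈ pvTerms, tp.2 < 5 → PySem.Chars.isIn tp.1 s = false := by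
              intro tp htp hlt
              simp only [pvTerms, List.mem_cons, List.not_mem_nil, or_false] at htp
              rcases htp with rfl|rfl|rfl|rfl|rfl|rfl|rfl|rfl|rfl|rfl|rfl|rfl|rfl|rfl|rfl|rfl|rfl|rfl|rfl|rfl|rfl|rfl|rfl|rfl|rfl|rfl|rfl <;>
                first | exact absurd hlt (by decide) | assumption
            by_cases g5 : (PySem.Chars.isIn "power".toList s || (PySem.Chars.isIn "exponent".toList s ||
                (PySem.Chars.isIn "^".toList s || (PySem.Chars.isIn "squared".toList s ||
                  PySem.Chars.isIn "cubed".toList s)))) = true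
            · rw [if_pos g5]
              simp only [Bool.or_eq_true] at g5
              have hv : pvFoldIn pvTerms s 8 = 5 := by
                rcases g5 with h | h | h | h | h
                · exact pvValue_eq s 5 _ (by omega) (by decide) h hprev5
                · exact pvValue_eq s 5 _ (by omega) (by decide) h hprev5
                · exact pvValue_eq s 5 _ (by omega) (by decide) h hprev5
                · exact pvValue_eq s 5 _ (by omega) (by decide) h hprev5
                · exact pvValue_eq s 5 _ (by omega) (by decide) h hprev5
              rw [hv]; norm_num [pvLabels]
            · rw [if_neg g5]
              simp only [Bool.or_eq_true, not_or, Bool.not_eq_true] at g5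
              obtain ⟨a0, a1, a2, a3, a4⟩ := g5
              have hprev6 : ∀ tp ∈ pvTerms, tp.2 < 6 → PySem.Chars.isIn tp.1 s = false := by
                intro tp htp hlt
                simp only [pvTerms, List.mem_cons, List.not_mem_nil, or_false] at htp
                rcases htp with rfl|rfl|rfl|rfl|rfl|rfl|rfl|rfl|rfl|rfl|rfl|rfl|rfl|rfl|rfl|rfl|rfl|rfl|rfl|rfl|rfl|rfl|rfl|rfl|rfl|rfl|rfl <;>
                first | exact absurd hlt (by decide) | assumption
              by_cases g6 : (PySem.Chars.isIn "sqrt".toList s ||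
                  PySem.Chars.isIn "square root".toList s) = true
              · rw [if_pos g6]
                simp only [Bool.or_eq_true] at g6
                have hv : pvFoldIn pvTerms s 8 = 6 := by
                  rcases g6 with h | h
                  · exact pvValue_eq s 6 _ (by omega) (by decide) h hprev6
                  · exact pvValue_eq s 6 _ (by omega) (by decide) h hprev6
                rw [hv]; norm_num [pvLabels]
              · rw [if_neg g6]
                simp only [Bool.or_eq_true, not_or, Bool.not_eq_true] at g6
                obtain ⟨s0, s1⟩ := g6
                have hprev7 : ∀ tp ∈ pvTerms, tp.2 < 7 → PySem.Chars.isIn tp.1 s = false := by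
                  intro tp htp hlt
                  simp only [pvTerms, List.mem_cons, List.not_mem_nil, or_false] at htp
                  rcases htp with rfl|rfl|rfl|rfl|rfl|rfl|rfl|rfl|rfl|rfl|rfl|rfl|rfl|rfl|rfl|rfl|rfl|rfl|rfl|rfl|rfl|rfl|rfl|rfl|rfl|rfl|rfl <;>
                first | exact absurd hlt (by decide) | assumption
                by_cases g7 : PySem.Chars.isIn "round".toList s = true
                · rw [if_pos g7]
                  have hv : pvFoldIn pvTerms s 8 = 7 :=
                    pvValue_eq s 7 _ (by omega) (by decide) g7 hprev7
                  rw [hv]; norm_num [pvLabels]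
                · rw [if_neg g7]
                  rw [Bool.not_eq_true] at g7
                  have hprev8 : ∀ tp ∈ pvTerms, tp.2 < 8 → PySem.Chars.isIn tp.1 s = false := by
                    intro tp htp hlt
                    simp only [pvTerms, List.mem_cons, List.not_mem_nil, or_false] at htp
                    rcases htp with rfl|rfl|rfl|rfl|rfl|rfl|rfl|rfl|rfl|rfl|rfl|rfl|rfl|rfl|rfl|rfl|rfl|rfl|rfl|rfl|rfl|rfl|rfl|rfl|rfl|rfl|rfl <;>
                first | exact absurd hlt (by decide) | assumption
                  have hv : pvFoldIn pvTerms s 8 = 8 :=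
                    le_antisymm (pvFoldIn_le_init pvTerms s 8) (pvFoldIn_ge pvTerms s 8 8 (le_refl 8) hprev8)
                  rw [hv]; norm_num [pvLabels]

-- ===== VERDICT (by name: the statement is the Claim_ definition above) =====
theorem identify_primary_operation_py_spec : Claim_equal_identify_primary_operation_py := by
  intro problem _
  unfold Spec_identify_primary_operation_py
  simp only [identify_primary_operation_py, identify_primary_operation_py_alt,
    List.any_cons, List.any_nil, Bool.or_false, Bool.or_assoc, PySem.Str.isIn_eq]
  rw [pvScan_eq]
  exact pvMain (PySem.Str.lower problem).toList
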